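-- pv_equiv track=rewrite | github.com/olostak/Boolean-Network-Identifiability | asynchronose_boolaen_networks.py | truth_table_to_sop
-- ===== SOURCE A (Python) =====
-- def truth_table_to_sop(truth_table):
--     sop_functions = []
--     for var_i in range(len(truth_table[0][0])):
--         sop_terms = []
--         for row in truth_table:
--             inputs, output = row
--             if output[var_i] == 1:
--                 term = []
--                 for idx, val in enumerate(inputs):
--                     if val == 1:
--                         term.append(f"x_{idx}")
--                     else:
--                         term.append(f"!x_{idx}")
--                 sop_terms.append(' & '.join(term))
--         sop_functions.append(' | '.join(['({})'.format(item) for item in sop_terms]))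
--     return sop_functions
-- ===== SOURCE B (Python) =====
-- def truth_table_to_sop(truth_table):
--     n = len(truth_table[0][0])
--     buckets = [[] for _ in range(n)]
--     for inputs, output in truth_table:
--         lits = []
--         for idx in range(len(inputs)):
--             lits.append(("x_" if inputs[idx] == 1 else "!x_") + str(idx))
--         term = "(" + " & ".join(lits) + ")"
--         for var_i in range(n):
--             if output[var_i] == 1:
--                 buckets[var_i].append(term)
--     return [" | ".join(b) for b in buckets]
-- ===== Notes on version B (the rewrite author's own statement) =====
-- stated objective: alternative
-- what changed: B makes a single row-major pass: it builds each row's parenthesised term once and distributes it into per-variable bucket lists, then joins the buckets, instead of A's per-variable passes over the table that rebuild every matching row's term for each variable.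
import Mathlib
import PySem

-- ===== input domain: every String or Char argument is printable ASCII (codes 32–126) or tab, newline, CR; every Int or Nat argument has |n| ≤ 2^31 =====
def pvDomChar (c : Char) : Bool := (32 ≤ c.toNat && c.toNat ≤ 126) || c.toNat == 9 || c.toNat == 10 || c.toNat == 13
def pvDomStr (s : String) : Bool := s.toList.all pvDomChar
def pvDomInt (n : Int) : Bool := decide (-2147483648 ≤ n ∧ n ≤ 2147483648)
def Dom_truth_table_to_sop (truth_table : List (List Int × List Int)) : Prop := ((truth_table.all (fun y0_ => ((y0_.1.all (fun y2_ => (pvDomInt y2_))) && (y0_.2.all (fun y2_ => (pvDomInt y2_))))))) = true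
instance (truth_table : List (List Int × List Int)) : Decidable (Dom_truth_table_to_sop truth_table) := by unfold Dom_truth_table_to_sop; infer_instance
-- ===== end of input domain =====

-- B makes one row-major pass: it builds each row's parenthesised term once and distributes it
-- into per-variable buckets, instead of A's per-variable passes that rebuild every row's term.

-- ===== PORT A =====
-- inner 'for idx, val in enumerate(inputs): term.append(...)' loop of A
def pvTermA (inputs : List Int) : String :=
  PySem.Str.join " & " ((PySem.List.enumerate inputs).foldl (fun term p =>
    if p.2 == 1 then term ++ ["x_" ++ PySem.Int.toStr p.1]
    else term ++ ["!x_" ++ PySem.Int.toStr p.1]) [])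

def truth_table_to_sop (truth_table : List (List Int × List Int)) : List String :=
  (PySem.List.pyRange 0 ((truth_table.headD ([], [])).1.length : Int) 1).foldl
    (fun sop_functions var_i =>
      let sop_terms := truth_table.foldl (fun acc row =>
        if PySem.List.pyGetD row.2 var_i 0 == 1 then acc ++ [pvTermA row.1] else acc) []
      sop_functions ++
        [PySem.Str.join " | " (sop_terms.map (fun item => "(" ++ item ++ ")"))]) []

-- ===== PORT B =====
-- 'lits' loop of B: indexes inputs by range(len(inputs)) and prepends "x_"/"!x_"
def pvTermB (inputs : List Int) : String :=
  "(" ++ PySem.Str.join " & "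
    ((PySem.List.pyRange 0 (inputs.length : Int) 1).foldl (fun lits idx =>
      lits ++ [(if PySem.List.pyGetD inputs idx 0 == 1 then "x_" else "!x_") ++ PySem.Int.toStr idx]) []) ++ ")"

def truth_table_to_sop_alt (truth_table : List (List Int × List Int)) : List String :=
  (truth_table.foldl (fun buckets row =>
      (PySem.List.pyRange 0 ((truth_table.headD ([], [])).1.length : Int) 1).foldl (fun b var_i =>
        if PySem.List.pyGetD row.2 var_i 0 == 1
        then b.set var_i.toNat ((b.getD var_i.toNat []) ++ [pvTermB row.1]) else b) buckets)
    (List.replicate ((truth_table.headD ([], [])).1.length : Int).toNat ([] : List String))).map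
    (fun bkt => PySem.Str.join " | " bkt)

-- ===== PRECONDITION & SPEC =====
-- Pre_: Python A raises IndexError on an empty table (truth_table[0]) and whenever some
-- row's output list is shorter than the first row's input list (output[var_i]).
def Pre_truth_table_to_sop (truth_table : List (List Int × List Int)) : Prop :=
  truth_table ≠ [] ∧
    ∀ row ∈ truth_table, (truth_table.headD ([], [])).1.length ≤ row.2.length
instance (truth_table : List (List Int × List Int)) : Decidable (Pre_truth_table_to_sop truth_table) := by unfold Pre_truth_table_to_sop; infer_instance
def pvWitness_truth_table_to_sop : (List (List Int × List Int)) := [([1, 0], [1, 0]), ([0, 1], [0, 1])]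
def Spec_truth_table_to_sop (truth_table : List (List Int × List Int)) (out : List String) : Prop := out = truth_table_to_sop_alt truth_table
instance (truth_table : List (List Int × List Int)) (out : List String) : Decidable (Spec_truth_table_to_sop truth_table out) := by unfold Spec_truth_table_to_sop; infer_instance

-- ===== CLAIM (what is proved, stated in full; the proofs are below) =====
def Claim_equal_truth_table_to_sop : Prop := ∀ (truth_table : List (List Int × List Int)), Dom_truth_table_to_sop truth_table → Pre_truth_table_to_sop truth_table → Spec_truth_table_to_sop truth_table (truth_table_to_sop truth_table)

-- ===== LEMMAS AND PROOFS =====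

-- A's term, parenthesised, is B's term.
lemma pvTermB_eq (inputs : List Int) : pvTermB inputs = "(" ++ pvTermA inputs ++ ")" := by
  unfold pvTermA pvTermB
  rw [PySem.List.enumerate_eq_map_pyRange (d := 0)]
  rw [PySem.List.foldl_append_singleton_eq_map, List.nil_append]
  have h : (fun (term : List String) (p : Int × Int) =>
      if p.2 == 1 then term ++ ["x_" ++ PySem.Int.toStr p.1]
      else term ++ ["!x_" ++ PySem.Int.toStr p.1]) =
      (fun (term : List String) (p : Int × Int) =>
        term ++ [if p.2 == 1 then "x_" ++ PySem.Int.toStr p.1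
                 else "!x_" ++ PySem.Int.toStr p.1]) := by
    funext term p; split <;> rfl
  rw [h, PySem.List.foldl_append_singleton_eq_map, List.nil_append, List.map_map]
  simp only [PySem.List.len_eq]
  congr 3
  refine List.map_congr_left (fun j hj => ?_)
  by_cases hj' : PySem.List.pyGetD inputs j 0 = 1 <;> simp [hj']

lemma set_map_range {α : Type} (N k : Nat) (h : Nat → α) (v : α) (hk : k < N) :
    ((List.range N).map h).set k v = (List.range N).map (fun i => if i = k then v else h i) := by
  apply List.ext_getElem
  · simp
  · intro i h1 h2
    simp only [List.getElem_set, List.getElem_map, List.getElem_range]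
    by_cases hik : k = i
    · subst hik; simp
    · simp [hik, show ¬ i = k from fun h => hik h.symm]

-- one row distributed into the buckets, buckets given as a map over range N
lemma pvInnerFoldAux (N : Nat) (P : Int → Bool) (t : String) (g : Nat → List String)
    (k : Nat) (hk : k ≤ N) :
    (PySem.List.pyRange 0 (k : Int) 1).foldl (fun b var_i =>
        if P var_i then b.set var_i.toNat ((b.getD var_i.toNat []) ++ [t]) else b)
      ((List.range N).map g)
    = (List.range N).map (fun i => if i < k ∧ P (i : Int) = true then g i ++ [t] else g i) := by
  induction k with
  | zero =>
      rw [PySem.List.pyRange_one_eq_nil (by norm_num)]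
      simp
  | succ k ih =>
      have hk' : k ≤ N := Nat.le_of_succ_le hk
      have hcast : ((k + 1 : Nat) : Int) = (k : Int) + 1 := by push_cast; ring
      rw [hcast, PySem.List.pyRange_one_succ_right (by positivity), List.foldl_append, ih hk']
      simp only [List.foldl_cons, List.foldl_nil]
      have hkN : k < N := lt_of_lt_of_le (Nat.lt_succ_self k) hk
      by_cases hP : P (k : Int)
      · simp only [hP, if_pos]
        have hgetD : (((List.range N).map
            (fun i => if i < k ∧ P (i : Int) = true then g i ++ [t] else g i)).getD
            ((k : Int)).toNat []) = g k := by
          rw [Int.toNat_natCast, PySem.List.getD_map_range _ _ _ _ hkN]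
          simp
        rw [hgetD, Int.toNat_natCast, set_map_range N k _ _ hkN]
        refine List.map_congr_left (fun i hi => ?_)
        by_cases hik : i = k
        · subst hik; simp [hP]
        · have h1 : i < k + 1 ↔ i < k := by omega
          simp only [hik, if_neg, h1, not_false_eq_true]
      · simp only [hP, if_neg, Bool.false_eq_true, not_false_eq_true]
        refine List.map_congr_left (fun i hi => ?_)
        by_cases hik : i = k
        · subst hik; simp [hP]
        · have h1 : i < k + 1 ↔ i < k := by omega
          simp only [h1]

lemma pvInnerFold (N : Nat) (P : Int → Bool) (t : String) (g : Nat → List String) :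
    (PySem.List.pyRange 0 (N : Int) 1).foldl (fun b var_i =>
        if P var_i then b.set var_i.toNat ((b.getD var_i.toNat []) ++ [t]) else b)
      ((List.range N).map g)
    = (List.range N).map (fun (i : Nat) => if P (i : Int) then g i ++ [t] else g i) := by
  rw [pvInnerFoldAux N P t g N (le_refl N)]
  refine List.map_congr_left (fun i hi => ?_)
  have : i < N := List.mem_range.mp hi
  by_cases hP : P (i : Int) <;> simp [hP, this]

-- the whole row loop of B, characterised per variable
lemma pvRowsFold (N : Nat) (rows : List (List Int × List Int)) (g : Nat → List String) :
    rows.foldl (fun buckets row =>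
        (PySem.List.pyRange 0 (N : Int) 1).foldl (fun b var_i =>
          if PySem.List.pyGetD row.2 var_i 0 == 1
          then b.set var_i.toNat ((b.getD var_i.toNat []) ++ [pvTermB row.1]) else b) buckets)
      ((List.range N).map g)
    = (List.range N).map (fun (i : Nat) =>
        g i ++ (rows.filter (fun r => PySem.List.pyGetD r.2 (i : Int) 0 == 1)).map
          (fun r => pvTermB r.1)) := by
  induction rows generalizing g with
  | nil => simp
  | cons r rs ih =>
      simp only [List.foldl_cons]
      rw [pvInnerFold N (fun v => PySem.List.pyGetD r.2 v 0 == 1) (pvTermB r.1) g, ih]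
      refine List.map_congr_left (fun i hi => ?_)
      simp only [List.filter_cons]
      by_cases hP : (PySem.List.pyGetD r.2 (i : Int) 0 == 1) = true
      · rw [if_pos hP, if_pos hP]; simp
      · rw [if_neg hP, if_neg hP]

lemma pvPorts_eq (truth_table : List (List Int × List Int)) :
    truth_table_to_sop truth_table = truth_table_to_sop_alt truth_table := by
  unfold truth_table_to_sop truth_table_to_sop_alt
  rw [PySem.List.foldl_append_singleton_eq_map, List.nil_append]
  have hrep : List.replicate (((truth_table.headD ([], [])).1.length : Int)).toNat ([] : List String)
      = (List.range (truth_table.headD ([], [])).1.length).map (fun _ => ([] : List String)) := by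
    simp [Int.toNat_natCast, List.map_const']
  rw [hrep, pvRowsFold (truth_table.headD ([], [])).1.length truth_table (fun _ => [])]
  rw [PySem.List.pyRange_zero_natCast, List.map_map, List.map_map]
  refine List.map_congr_left (fun i hi => ?_)
  simp only [Function.comp]
  rw [PySem.List.foldl_append_if, List.nil_append, List.nil_append, List.map_map]
  congr 1
  refine List.map_congr_left (fun r hr => ?_)
  exact (pvTermB_eq r.1).symm

-- ===== VERDICT (by name: the statement is the Claim_ definition above) =====
theorem truth_table_to_sop_spec : Claim_equal_truth_table_to_sop := by
  intro tt _ _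
  exact pvPorts_eq tt
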